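-- pv_equiv track=rewrite | github.com/sungsiyul/Algorithm_python | 251025/트로미노/tromino.py | rotate_blocks_1
-- ===== SOURCE A (Python) =====
-- def rotate_blocks_1(i, j, n, m, grid):
--     max_sum = 0
--     ratations = [[i-1, j-1], [i-1, j+1], [i+1, j-1], [i+1, j+1]]
--     for ratation in ratations:
--         if ratation[0] <= n-1 and ratation[0] >= 0 and ratation[1] <= m-1 and ratation[1] >= 0:
--             block_sum = grid[i][j] + grid[ratation[0]][j] + grid[i][ratation[1]]
--             if max_sum < block_sum:
--                 max_sum = block_sum
--     return max_sum
-- ===== SOURCE B (Python) =====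
-- def rotate_blocks_1(i, j, n, m, grid):
--     rows = [r for r in (i - 1, i + 1) if 0 <= r < n]
--     cols = [c for c in (j - 1, j + 1) if 0 <= c < m]
--     if not rows or not cols:
--         return 0
--     best_v = max(grid[r][j] for r in rows)
--     best_h = max(grid[i][c] for c in cols)
--     return max(0, grid[i][j] + best_v + best_h)
-- ===== Notes on version B (the rewrite author's own statement) =====
-- stated objective: simpler
-- what changed: Replaces A's enumeration of the 4 coupled (row,col) corner pairs with a running max by two independent 1-D scans (best valid vertical neighbour, best valid horizontal neighbour) combined once under a max(0,...) clamp.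
import Mathlib
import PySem

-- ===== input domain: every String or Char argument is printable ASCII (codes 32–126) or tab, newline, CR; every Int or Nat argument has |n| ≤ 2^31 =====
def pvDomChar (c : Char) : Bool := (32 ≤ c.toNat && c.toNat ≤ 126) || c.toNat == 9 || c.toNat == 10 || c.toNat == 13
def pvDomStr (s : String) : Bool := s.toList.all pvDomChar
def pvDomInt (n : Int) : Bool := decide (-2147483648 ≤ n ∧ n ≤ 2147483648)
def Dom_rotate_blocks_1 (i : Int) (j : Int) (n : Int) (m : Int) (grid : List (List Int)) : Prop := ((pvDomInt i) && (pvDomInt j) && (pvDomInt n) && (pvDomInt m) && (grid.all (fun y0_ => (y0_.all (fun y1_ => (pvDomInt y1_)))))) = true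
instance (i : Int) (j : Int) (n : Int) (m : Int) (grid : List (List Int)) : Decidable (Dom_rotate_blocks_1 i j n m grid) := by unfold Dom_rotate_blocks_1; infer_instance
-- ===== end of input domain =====

-- B replaces A's 4-way corner enumeration with two independent 1-D maxima (rows and columns) combined once; simpler decomposition.

-- grid[r][c] with Python indexing (negative = from the end); default 0 is never hit under Pre_
def pvCell (grid : List (List Int)) (r c : Int) : Int :=
  PySem.List.pyGetD (PySem.List.pyGetD grid r []) c 0

-- ===== PORT A =====
def rotate_blocks_1 (i : Int) (j : Int) (n : Int) (m : Int) (grid : List (List Int)) : Int :=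
  let ratations : List (List Int) := [[i-1, j-1], [i-1, j+1], [i+1, j-1], [i+1, j+1]]
  ratations.foldl (fun max_sum ratation =>
    if PySem.List.pyGetD ratation 0 0 ≤ n - 1 ∧ 0 ≤ PySem.List.pyGetD ratation 0 0 ∧
       PySem.List.pyGetD ratation 1 0 ≤ m - 1 ∧ 0 ≤ PySem.List.pyGetD ratation 1 0 then
      let block_sum := pvCell grid i j + pvCell grid (PySem.List.pyGetD ratation 0 0) j
                         + pvCell grid i (PySem.List.pyGetD ratation 1 0)
      if max_sum < block_sum then block_sum else max_sum
    else max_sum) 0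

-- ===== PORT B =====
def rotate_blocks_1_alt (i : Int) (j : Int) (n : Int) (m : Int) (grid : List (List Int)) : Int :=
  let rows := ([i-1, i+1] : List Int).filter (fun r => 0 ≤ r && r < n)
  let cols := ([j-1, j+1] : List Int).filter (fun c => 0 ≤ c && c < m)
  if rows = [] ∨ cols = [] then 0
  else
    let best_v := ((rows.map (fun r => pvCell grid r j)).max?).getD 0
    let best_h := ((cols.map (fun c => pvCell grid i c)).max?).getD 0
    max 0 (pvCell grid i j + best_v + best_h)

-- ===== PRECONDITION & SPEC =====
-- grid[r][c] is a valid Python access (row r exists, c in range of that row)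
def pvAccOK (grid : List (List Int)) (r c : Int) : Bool :=
  match PySem.List.pyGet? grid r with
  | some row => decide (PySem.Raise.InRange row.length c)
  | none => false

-- Pre_ excludes exactly the inputs where Python A raises an IndexError: some rotation is
-- accepted by the n/m bound check but one of the grid accesses A then performs is out of range.
def Pre_rotate_blocks_1 (i : Int) (j : Int) (n : Int) (m : Int) (grid : List (List Int)) : Prop :=
  (((0 ≤ i-1 ∧ i-1 < n) ∨ (0 ≤ i+1 ∧ i+1 < n)) ∧ ((0 ≤ j-1 ∧ j-1 < m) ∨ (0 ≤ j+1 ∧ j+1 < m))) →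
    (pvAccOK grid i j = true ∧
     ((0 ≤ j-1 ∧ j-1 < m) → pvAccOK grid i (j-1) = true) ∧
     ((0 ≤ j+1 ∧ j+1 < m) → pvAccOK grid i (j+1) = true) ∧
     ((0 ≤ i-1 ∧ i-1 < n) → pvAccOK grid (i-1) j = true) ∧
     ((0 ≤ i+1 ∧ i+1 < n) → pvAccOK grid (i+1) j = true))
instance (i : Int) (j : Int) (n : Int) (m : Int) (grid : List (List Int)) : Decidable (Pre_rotate_blocks_1 i j n m grid) := by unfold Pre_rotate_blocks_1; infer_instance

def pvWitness_rotate_blocks_1 : Int × Int × Int × Int × List (List Int) :=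
  (1, 1, 3, 3, [[1, 2, 3], [4, 5, 6], [7, 8, 9]])

def Spec_rotate_blocks_1 (i : Int) (j : Int) (n : Int) (m : Int) (grid : List (List Int)) (out : Int) : Prop := out = rotate_blocks_1_alt i j n m grid
instance (i : Int) (j : Int) (n : Int) (m : Int) (grid : List (List Int)) (out : Int) : Decidable (Spec_rotate_blocks_1 i j n m grid out) := by unfold Spec_rotate_blocks_1; infer_instance

-- ===== CLAIM (what is proved, stated in full; the proofs are below) =====
def Claim_equal_rotate_blocks_1 : Prop := ∀ (i : Int) (j : Int) (n : Int) (m : Int) (grid : List (List Int)), Dom_rotate_blocks_1 i j n m grid → Pre_rotate_blocks_1 i j n m grid → Spec_rotate_blocks_1 i j n m grid (rotate_blocks_1 i j n m grid)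

-- ===== LEMMAS AND PROOFS =====
theorem pv_g0 (a b : Int) : PySem.List.pyGetD [a, b] 0 0 = a := rfl
theorem pv_g1 (a b : Int) : PySem.List.pyGetD [a, b] 1 0 = b := rfl
theorem pv_step (a b : Int) : (if a < b then b else a) = max a b := by omega
theorem pv_c11 (i j n m : Int) :
    (i - 1 ≤ n - 1 ∧ 0 ≤ i - 1 ∧ j - 1 ≤ m - 1 ∧ 0 ≤ j - 1) ↔
      ((0 ≤ i - 1 ∧ i - 1 < n) ∧ (0 ≤ j - 1 ∧ j - 1 < m)) := by omega
theorem pv_c12 (i j n m : Int) :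
    (i - 1 ≤ n - 1 ∧ 0 ≤ i - 1 ∧ j + 1 ≤ m - 1 ∧ 0 ≤ j + 1) ↔
      ((0 ≤ i - 1 ∧ i - 1 < n) ∧ (0 ≤ j + 1 ∧ j + 1 < m)) := by omega
theorem pv_c21 (i j n m : Int) :
    (i + 1 ≤ n - 1 ∧ 0 ≤ i + 1 ∧ j - 1 ≤ m - 1 ∧ 0 ≤ j - 1) ↔
      ((0 ≤ i + 1 ∧ i + 1 < n) ∧ (0 ≤ j - 1 ∧ j - 1 < m)) := by omega
theorem pv_c22 (i j n m : Int) :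
    (i + 1 ≤ n - 1 ∧ 0 ≤ i + 1 ∧ j + 1 ≤ m - 1 ∧ 0 ≤ j + 1) ↔
      ((0 ≤ i + 1 ∧ i + 1 < n) ∧ (0 ≤ j + 1 ∧ j + 1 < m)) := by omega

theorem pv_key (i j n m : Int) (grid : List (List Int)) :
    rotate_blocks_1 i j n m grid = rotate_blocks_1_alt i j n m grid := by
  simp only [rotate_blocks_1, rotate_blocks_1_alt]
  simp only [List.foldl]
  simp only [List.filter_cons, List.filter_nil]
  simp only [pv_g0, pv_g1, pv_step, pv_c11, pv_c12, pv_c21, pv_c22,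
    Bool.and_eq_true, decide_eq_true_eq]
  by_cases h1 : 0 ≤ i - 1 ∧ i - 1 < n <;>
    by_cases h2 : 0 ≤ i + 1 ∧ i + 1 < n <;>
      by_cases h3 : 0 ≤ j - 1 ∧ j - 1 < m <;>
        by_cases h4 : 0 ≤ j + 1 ∧ j + 1 < m <;>
          simp only [h1, h2, h3, h4, and_self, and_true, true_and, and_false, false_and,
            if_true, if_false, ite_true, ite_false, List.map_cons, List.map_nil,
            List.max?_cons', List.max?_nil, List.foldl, Option.getD_some,
            List.cons_ne_nil, or_false, false_or, or_self, or_true, true_or,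
            not_true, not_false_iff, reduceCtorEq] <;>
          omega

-- ===== VERDICT (by name: the statement is the Claim_ definition above) =====
theorem rotate_blocks_1_spec : Claim_equal_rotate_blocks_1 := by
  intro i j n m grid _ _
  unfold Spec_rotate_blocks_1
  exact pv_key i j n m grid
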